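-- pv_equiv track=rewrite | github.com/ljunker/AdventOfCode-2023-python | Day14.py | tilt_turn
-- ===== SOURCE A (Python) =====
-- def tilt_turn(grid):
--     for y in range(len(grid)):
--         for x in range(len(grid[0])):
--             if grid[y][x] == 'O':
--                 ny = y
--                 grid[ny][x] = '.'
--                 while ny >= 0 and grid[ny][x] == '.':
--                     ny -= 1
--                 grid[ny + 1][x] = 'O'
--     return list(map(list, zip(*grid[::-1])))
-- ===== SOURCE B (Python) =====
-- def tilt_turn(grid):
--     # Mutates grid in place exactly like A, then returns the clockwise rotation.
--     cols = len(grid[0]) if grid else 0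
--     next_free = [0] * cols
--     for y in range(len(grid)):
--         for x in range(cols):
--             c = grid[y][x]
--             if c == 'O':
--                 grid[y][x] = '.'
--                 grid[next_free[x]][x] = 'O'
--                 next_free[x] += 1
--             elif c != '.':
--                 next_free[x] = y + 1
--     return list(map(list, zip(*grid[::-1])))
-- ===== Notes on version B (the rewrite author's own statement) =====
-- stated objective: alternative
-- what changed: Replaces A's per-rock backward while-scan up the column with a single forward pass that maintains one next-free-row pointer per column, so the inner scan disappears.
import Mathlib
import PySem

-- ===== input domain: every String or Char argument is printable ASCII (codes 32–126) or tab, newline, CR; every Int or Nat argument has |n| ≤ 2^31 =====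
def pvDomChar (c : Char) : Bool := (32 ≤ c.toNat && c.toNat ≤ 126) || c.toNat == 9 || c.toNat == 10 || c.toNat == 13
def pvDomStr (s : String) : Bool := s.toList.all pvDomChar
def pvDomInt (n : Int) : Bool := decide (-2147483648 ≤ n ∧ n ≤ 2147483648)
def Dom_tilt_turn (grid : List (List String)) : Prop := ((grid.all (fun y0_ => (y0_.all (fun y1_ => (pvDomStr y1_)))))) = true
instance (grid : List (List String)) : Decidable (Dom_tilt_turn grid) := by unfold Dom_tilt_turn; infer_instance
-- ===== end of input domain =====

-- B replaces A's inner upward while-scan per rock with next-free pointers (one per column)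
-- maintained across a single forward pass; B mutates the input grid in place exactly as A does
-- (the equivalence proved here is about the return value).

-- ===== PORT A =====
-- shared primitive: grid[y][x] read (in-range on Pre_; "" default otherwise)
def pvCell (g : List (List String)) (y x : Nat) : String := (g[y]?.getD [])[x]?.getD ""
-- shared primitive: grid[y][x] = v
def pvSet (g : List (List String)) (y x : Nat) (v : String) : List (List String) :=
  g.set y ((g[y]?.getD []).set x v)

-- A's `ny = y; while ny >= 0 and grid[ny][x] == '.': ny -= 1` followed by `ny + 1`
def pvScanUp (g : List (List String)) (x : Nat) : Nat → Nat
  | 0 => if pvCell g 0 x = "." then 0 else 1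
  | n+1 => if pvCell g (n+1) x = "." then pvScanUp g x n else n + 2

-- shared: `list(map(list, zip(*grid[::-1])))` (zip truncates to the shortest row)
def pvRotate (g : List (List String)) : List (List String) :=
  match g with
  | [] => []
  | r :: rs =>
    let n := rs.foldl (fun m row => Nat.min m row.length) r.length
    (List.range n).map (fun i => (r :: rs).reverse.map (fun row => row[i]?.getD ""))

-- body of A's `if grid[y][x] == 'O': …`
def pvStepA (g : List (List String)) (y x : Nat) : List (List String) :=
  if pvCell g y x = "O" then
    let g1 := pvSet g y x "."
    pvSet g1 (pvScanUp g1 x y) x "O"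
  else g

def pvLoopA (g : List (List String)) (y w : Nat) : List (List String) :=
  (List.range w).foldl (fun g x => pvStepA g y x) g

def tilt_turn (grid : List (List String)) : List (List String) :=
  pvRotate ((List.range grid.length).foldl
    (fun g y => pvLoopA g y (grid.headD []).length) grid)

-- ===== PORT B =====
-- body of B's inner loop: state = (grid, next_free)
def pvStepB (s : List (List String) × List Nat) (y x : Nat) : List (List String) × List Nat :=
  let c := pvCell s.1 y x
  if c = "O" then
    let g := pvSet s.1 y x "."
    (pvSet g (s.2[x]?.getD 0) x "O", s.2.set x ((s.2[x]?.getD 0) + 1))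
  else if c ≠ "." then (s.1, s.2.set x (y + 1))
  else s

def pvLoopB (s : List (List String) × List Nat) (y w : Nat) : List (List String) × List Nat :=
  (List.range w).foldl (fun s x => pvStepB s y x) s

def tilt_turn_alt (grid : List (List String)) : List (List String) :=
  let cols := if grid.isEmpty then 0 else (grid.headD []).length
  pvRotate ((List.range grid.length).foldl
    (fun s y => pvLoopB s y cols) (grid, List.replicate cols 0)).1

-- ===== PRECONDITION & SPEC =====
-- Pre_ excludes exactly the ragged grids on which some row is shorter than row 0:
-- there A (and B) raise IndexError reading grid[y][x] for x in range(len(grid[0])).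
def Pre_tilt_turn (grid : List (List String)) : Prop :=
  ∀ row ∈ grid, (grid.headD []).length ≤ row.length
instance (grid : List (List String)) : Decidable (Pre_tilt_turn grid) := by
  unfold Pre_tilt_turn; infer_instance

def pvWitness_tilt_turn : List (List String) :=
  [["O", ".", "#"], [".", "O", "O"], ["#", ".", "O"]]

def Spec_tilt_turn (grid : List (List String)) (out : List (List String)) : Prop := out = tilt_turn_alt grid
instance (grid : List (List String)) (out : List (List String)) : Decidable (Spec_tilt_turn grid out) := by unfold Spec_tilt_turn; infer_instance

-- ===== CLAIM (what is proved, stated in full; the proofs are below) =====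
def Claim_equal_tilt_turn : Prop := ∀ (grid : List (List String)), Dom_tilt_turn grid → Pre_tilt_turn grid → Spec_tilt_turn grid (tilt_turn grid)

-- ===== LEMMAS AND PROOFS =====

-- every row of g (position-wise) has length ≥ w
def pvRowsOK (w : Nat) (g : List (List String)) : Prop :=
  ∀ j, j < g.length → w ≤ ((g[j]?.getD []) : List String).length

-- next-free-pointer invariant for column x after processing rows < y:
-- cells f..y-1 of column x are "." and the cell just above f is not "."
def pvInvC (g : List (List String)) (f x y : Nat) : Prop :=
  f ≤ y ∧ (∀ i, f ≤ i → i < y → pvCell g i x = ".") ∧ (f = 0 ∨ pvCell g (f-1) x ≠ ".")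

theorem pvSet_length (g : List (List String)) (y x : Nat) (v : String) :
    (pvSet g y x v).length = g.length := by
  simp [pvSet]

theorem pvCell_pvSet_self (g : List (List String)) (y x : Nat) (v : String)
    (hy : y < g.length) (hx : x < ((g[y]?.getD []) : List String).length) :
    pvCell (pvSet g y x v) y x = v := by
  simp [pvCell, pvSet, List.getElem?_set_self hy, List.getElem?_set_self hx]

theorem pvCell_pvSet_ne (g : List (List String)) (y x i j : Nat) (v : String)
    (h : i ≠ y ∨ j ≠ x) : pvCell (pvSet g y x v) i j = pvCell g i j := by
  rcases h with h | h
  · simp [pvCell, pvSet, List.getElem?_set_ne (Ne.symm h)]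
  · by_cases hiy : i = y
    · subst hiy
      by_cases hlt : i < g.length
      · simp [pvCell, pvSet, List.getElem?_set_self hlt, List.getElem?_set_ne (Ne.symm h)]
      · have h1 : (g.set i ((g[i]?.getD []).set x v))[i]? = none :=
          List.getElem?_eq_none (by simpa using Nat.le_of_not_lt hlt)
        have h2 : g[i]? = none := List.getElem?_eq_none (Nat.le_of_not_lt hlt)
        simp only [pvCell, pvSet]
        rw [h1, h2]
    · simp [pvCell, pvSet, List.getElem?_set_ne (Ne.symm hiy)]

theorem pvRowLen_pvSet (g : List (List String)) (y x j : Nat) (v : String) :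
    (((pvSet g y x v)[j]?.getD []) : List String).length = ((g[j]?.getD []) : List String).length := by
  by_cases hjy : j = y
  · subst hjy
    by_cases hlt : j < g.length
    · simp [pvSet, List.getElem?_set_self hlt]
    · have h1 : (g.set j ((g[j]?.getD []).set x v))[j]? = none :=
        List.getElem?_eq_none (by simpa using Nat.le_of_not_lt hlt)
      have h2 : g[j]? = none := List.getElem?_eq_none (Nat.le_of_not_lt hlt)
      simp only [pvSet]
      rw [h1, h2]
  · simp [pvSet, List.getElem?_set_ne (Ne.symm hjy)]

theorem pvRowsOK_pvSet (w : Nat) (g : List (List String)) (y x : Nat) (v : String)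
    (h : pvRowsOK w g) : pvRowsOK w (pvSet g y x v) := by
  intro j hj
  rw [pvRowLen_pvSet]
  exact h j (by simpa [pvSet_length] using hj)

theorem pvScanUp_eq (g : List (List String)) (x : Nat) :
    ∀ n f, f ≤ n + 1 → (∀ i, f ≤ i → i ≤ n → pvCell g i x = ".") →
    (f = 0 ∨ pvCell g (f-1) x ≠ ".") → pvScanUp g x n = f := by
  intro n
  induction n with
  | zero =>
    intro f hf hdots hstop
    interval_cases f
    · simp [pvScanUp, hdots 0 le_rfl le_rfl]
    · rcases hstop with h | h
      · omega
      · simp only [pvScanUp]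
        rw [if_neg (by simpa using h)]
  | succ n ih =>
    intro f hf hdots hstop
    by_cases hfe : f = n + 2
    · subst hfe
      rcases hstop with h | h
      · omega
      · simp only [pvScanUp]
        rw [if_neg (by simpa using h)]
    · have hf' : f ≤ n + 1 := by omega
      simp only [pvScanUp]
      rw [if_pos (hdots (n+1) hf' le_rfl)]
      exact ih f hf' (fun i h1 h2 => hdots i h1 (by omega)) hstop

theorem pvInvC_congr (g g2 : List (List String)) (f x y : Nat)
    (hc : ∀ i, pvCell g2 i x = pvCell g i x) (h : pvInvC g f x y) : pvInvC g2 f x y := by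
  obtain ⟨h1, h2, h3⟩ := h
  refine ⟨h1, fun i a b => by rw [hc i]; exact h2 i a b, ?_⟩
  rcases h3 with h | h
  · exact Or.inl h
  · exact Or.inr (by rw [hc _]; exact h)

-- one column step: A's step equals B's step (grid part), B's pointer invariant advances,
-- and other columns / other pointers are untouched
theorem pvStep_eq (N w : Nat) (g : List (List String)) (nf : List Nat) (y x : Nat)
    (hgN : g.length = N) (hR : pvRowsOK w g) (hnf : nf.length = w)
    (hy : y < N) (hx : x < w) (hI : pvInvC g (nf[x]?.getD 0) x y) :
    pvStepA g y x = (pvStepB (g, nf) y x).1 ∧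
    (pvStepB (g, nf) y x).1.length = N ∧
    pvRowsOK w (pvStepB (g, nf) y x).1 ∧
    (pvStepB (g, nf) y x).2.length = w ∧
    pvInvC (pvStepB (g, nf) y x).1 ((pvStepB (g, nf) y x).2[x]?.getD 0) x (y+1) ∧
    (∀ x', x' ≠ x →
      (∀ i, pvCell (pvStepB (g, nf) y x).1 i x' = pvCell g i x') ∧
      ((pvStepB (g, nf) y x).2[x']?.getD 0) = (nf[x']?.getD 0)) := by
  have hyN : y < g.length := by omega
  have hxr : x < ((g[y]?.getD []) : List String).length := Nat.lt_of_lt_of_le hx (hR y hyN)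
  have hxnf : x < nf.length := by omega
  obtain ⟨hf_le, hdots, hstop⟩ := hI
  by_cases hO : pvCell g y x = "O"
  · have hscan : pvScanUp (pvSet g y x ".") x y = nf[x]?.getD 0 := by
      apply pvScanUp_eq
      · omega
      · intro i h1 h2
        by_cases hiy : i = y
        · rw [hiy]; exact pvCell_pvSet_self g y x "." hyN hxr
        · rw [pvCell_pvSet_ne g y x i x "." (Or.inl hiy)]
          exact hdots i h1 (by omega)
      · by_cases hf0 : nf[x]?.getD 0 = 0
        · exact Or.inl hf0
        · refine Or.inr ?_
          rw [pvCell_pvSet_ne g y x _ x "." (Or.inl (by omega))]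
          rcases hstop with h | h
          · exact absurd h hf0
          · exact h
    have hR1 : pvRowsOK w (pvSet g y x ".") := pvRowsOK_pvSet w g y x "." hR
    have hfN : nf[x]?.getD 0 < (pvSet g y x ".").length := by
      rw [pvSet_length]; omega
    have hfr : x < (((pvSet g y x ".")[nf[x]?.getD 0]?.getD []) : List String).length :=
      Nat.lt_of_lt_of_le hx (hR1 _ hfN)
    have hB : pvStepB (g, nf) y x =
        (pvSet (pvSet g y x ".") (nf[x]?.getD 0) x "O", nf.set x (nf[x]?.getD 0 + 1)) := by
      simp [pvStepB, hO]
    have hA : pvStepA g y x = pvSet (pvSet g y x ".") (nf[x]?.getD 0) x "O" := by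
      simp only [pvStepA, hO, reduceIte, hscan]
    rw [hA, hB]
    refine ⟨rfl, by simp [pvSet_length, hgN], pvRowsOK_pvSet _ _ _ _ _ hR1, by simp [hnf], ?_, ?_⟩
    · have hfx' : (nf.set x (nf[x]?.getD 0 + 1))[x]?.getD 0 = nf[x]?.getD 0 + 1 := by
        simp [List.getElem?_set_self hxnf]
      simp only [hfx']
      refine ⟨by omega, ?_, Or.inr ?_⟩
      · intro i h1 h2
        rw [pvCell_pvSet_ne _ _ _ i x "O" (Or.inl (by omega))]
        by_cases hiy : i = y
        · rw [hiy]; exact pvCell_pvSet_self g y x "." hyN hxr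
        · rw [pvCell_pvSet_ne g y x i x "." (Or.inl hiy)]
          exact hdots i (by omega) (by omega)
      · have hcO : pvCell (pvSet (pvSet g y x ".") (nf[x]?.getD 0) x "O") (nf[x]?.getD 0 + 1 - 1) x = "O" := by
          simpa using pvCell_pvSet_self (pvSet g y x ".") (nf[x]?.getD 0) x "O" hfN hfr
        rw [hcO]; decide
    · intro x' hx'
      refine ⟨?_, ?_⟩
      · intro i
        rw [pvCell_pvSet_ne _ _ _ i x' "O" (Or.inr hx'),
            pvCell_pvSet_ne g y x i x' "." (Or.inr hx')]
      · simp [List.getElem?_set_ne (Ne.symm hx')]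
  · by_cases hDot : pvCell g y x = "."
    · have hB : pvStepB (g, nf) y x = (g, nf) := by simp [pvStepB, hDot]
      have hA : pvStepA g y x = g := by simp [pvStepA, hO]
      rw [hA, hB]; dsimp only
      refine ⟨rfl, hgN, hR, hnf, ⟨Nat.le_succ_of_le hf_le, ?_, hstop⟩, fun x' hx' => ⟨fun i => rfl, rfl⟩⟩
      intro i h1 h2
      by_cases hiy : i = y
      · rw [hiy]; exact hDot
      · exact hdots i h1 (by omega)
    · have hB : pvStepB (g, nf) y x = (g, nf.set x (y + 1)) := by
        simp [pvStepB, hO, hDot]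
      have hA : pvStepA g y x = g := by simp [pvStepA, hO]
      rw [hA, hB]; dsimp only
      refine ⟨rfl, hgN, hR, by simp [hnf], ?_, ?_⟩
      · have hfx' : (nf.set x (y + 1))[x]?.getD 0 = y + 1 := by
          simp [List.getElem?_set_self hxnf]
        simp only [hfx']
        refine ⟨le_rfl, fun i h1 h2 => by omega, Or.inr ?_⟩
        simpa using hDot
      · intro x' hx'
        exact ⟨fun i => rfl, by simp [List.getElem?_set_ne (Ne.symm hx')]⟩

theorem pvInner_eq (N w y : Nat) (hy : y < N) :
    ∀ k, k ≤ w → ∀ (g : List (List String)) (nf : List Nat),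
    g.length = N → pvRowsOK w g → nf.length = w →
    (∀ x, x < w → pvInvC g (nf[x]?.getD 0) x y) →
    ((List.range k).foldl (fun g x => pvStepA g y x) g =
      ((List.range k).foldl (fun s x => pvStepB s y x) (g, nf)).1) ∧
    (((List.range k).foldl (fun s x => pvStepB s y x) (g, nf)).1.length = N) ∧
    pvRowsOK w ((List.range k).foldl (fun s x => pvStepB s y x) (g, nf)).1 ∧
    (((List.range k).foldl (fun s x => pvStepB s y x) (g, nf)).2.length = w) ∧
    (∀ x, x < w →
      pvInvC ((List.range k).foldl (fun s x => pvStepB s y x) (g, nf)).1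
        (((List.range k).foldl (fun s x => pvStepB s y x) (g, nf)).2[x]?.getD 0) x
        (if x < k then y + 1 else y)) := by
  intro k
  induction k with
  | zero =>
    intro hk g nf h1 h2 h3 h4
    simp only [List.range_zero, List.foldl_nil]
    exact ⟨trivial, h1, h2, h3, fun x hx => by rw [if_neg (Nat.not_lt_zero x)]; exact h4 x hx⟩
  | succ k ih =>
    intro hk g nf h1 h2 h3 h4
    have hkw : k < w := hk
    obtain ⟨hEq, hLen, hRo, hNf, hInv⟩ := ih (by omega) g nf h1 h2 h3 h4
    rcases hSB : (List.range k).foldl (fun s x => pvStepB s y x) (g, nf) with ⟨gk, nfk⟩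
    rw [hSB] at hEq hLen hRo hNf hInv
    have hIk : pvInvC gk (nfk[k]?.getD 0) k y := by
      have h := hInv k hkw
      rw [if_neg (lt_irrefl k)] at h
      exact h
    obtain ⟨sEq, sLen, sRo, sNf, sInv, sOther⟩ :=
      pvStep_eq N w gk nfk y k hLen hRo hNf hy hkw hIk
    rw [List.range_succ, List.foldl_append, List.foldl_append, hSB]
    simp only [List.foldl_cons, List.foldl_nil]
    refine ⟨?_, sLen, sRo, sNf, ?_⟩
    · rw [hEq]; exact sEq
    · intro x hxw
      by_cases hxk : x = k
      · rw [hxk, if_pos (Nat.lt_succ_self k)]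
        exact sInv
      · obtain ⟨hcells, hnfx⟩ := sOther x hxk
        rw [hnfx]
        have hx2 := hInv x hxw
        by_cases hlt : x < k
        · rw [if_pos hlt] at hx2
          rw [if_pos (by omega)]
          exact pvInvC_congr _ _ _ _ _ hcells hx2
        · rw [if_neg hlt] at hx2
          rw [if_neg (by omega)]
          exact pvInvC_congr _ _ _ _ _ hcells hx2

theorem pvOuter_eq (N w : Nat) (grid : List (List String))
    (hN : grid.length = N) (hR : pvRowsOK w grid) :
    ∀ m, m ≤ N →
    ((List.range m).foldl (fun g y => pvLoopA g y w) grid =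
      ((List.range m).foldl (fun s y => pvLoopB s y w) (grid, List.replicate w 0)).1) ∧
    (((List.range m).foldl (fun s y => pvLoopB s y w) (grid, List.replicate w 0)).1.length = N) ∧
    pvRowsOK w ((List.range m).foldl (fun s y => pvLoopB s y w) (grid, List.replicate w 0)).1 ∧
    (((List.range m).foldl (fun s y => pvLoopB s y w) (grid, List.replicate w 0)).2.length = w) ∧
    (∀ x, x < w →
      pvInvC ((List.range m).foldl (fun s y => pvLoopB s y w) (grid, List.replicate w 0)).1
        (((List.range m).foldl (fun s y => pvLoopB s y w) (grid, List.replicate w 0)).2[x]?.getD 0) x m) := by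
  intro m
  induction m with
  | zero =>
    intro _
    simp only [List.range_zero, List.foldl_nil]
    refine ⟨trivial, hN, hR, by simp, ?_⟩
    intro x hx
    have h0 : ((List.replicate w (0 : Nat))[x]?.getD 0) = 0 := by
      simp [hx]
    rw [h0]
    exact ⟨le_rfl, fun i a b => by omega, Or.inl rfl⟩
  | succ m ih =>
    intro hm
    obtain ⟨hEq, hLen, hRo, hNf, hInv⟩ := ih (by omega)
    rcases hSB : (List.range m).foldl (fun s y => pvLoopB s y w) (grid, List.replicate w 0) with ⟨gm, nfm⟩
    rw [hSB] at hEq hLen hRo hNf hInv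
    obtain ⟨iEq, iLen, iRo, iNf, iInv⟩ :=
      pvInner_eq N w m (by omega) w le_rfl gm nfm hLen hRo hNf hInv
    rw [List.range_succ, List.foldl_append, List.foldl_append, hSB]
    simp only [List.foldl_cons, List.foldl_nil]
    refine ⟨?_, iLen, iRo, iNf, ?_⟩
    · show pvLoopA ((List.range m).foldl (fun g y => pvLoopA g y w) grid) m w = _
      rw [hEq]
      simp only [pvLoopA, pvLoopB]
      exact iEq
    · intro x hx
      have h := iInv x hx
      rw [if_pos hx] at h
      simp only [pvLoopB]
      exact h

-- ===== VERDICT (by name: the statement is the Claim_ definition above) =====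
theorem tilt_turn_spec : Claim_equal_tilt_turn := by
  intro grid _ hpre
  unfold Spec_tilt_turn
  simp only [tilt_turn, tilt_turn_alt]
  have hcols : (if grid.isEmpty then 0 else (grid.headD []).length) = (grid.headD []).length := by
    cases grid <;> simp
  rw [hcols]
  have hR : pvRowsOK (grid.headD []).length grid := by
    intro j hj
    have hj2 : grid[j]?.getD [] = grid[j] := by
      rw [List.getElem?_eq_getElem hj]; rfl
    rw [hj2]
    exact hpre _ (List.getElem_mem hj)
  exact congrArg pvRotate
    (pvOuter_eq grid.length (grid.headD []).length grid rfl hR grid.length le_rfl).1
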